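-- pv_equiv track=rewrite | github.com/qscrgn24/Ben-10.py | Ben10.py | card_distribution
-- ===== SOURCE A (Python) =====
-- def card_distribution(shuffled,player1_cards,player2_cards):
-- 	c=0
-- 	t=len(shuffled)
-- 	for card in shuffled:
-- 		if c%2==0:
-- 			player1_cards.append(card)
-- 		else:
-- 			player2_cards.append(card)
-- 		c+=1
--
-- 	return player1_cards, player2_cards
-- ===== SOURCE B (Python) =====
-- def card_distribution(shuffled, player1_cards, player2_cards):
--     player1_cards.extend(shuffled[0::2])
--     player2_cards.extend(shuffled[1::2])
--     return player1_cards, player2_cards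
-- ===== Notes on version B (the rewrite author's own statement) =====
-- stated objective: simpler
-- what changed: Replaces the counter-and-parity-branch loop with two strided slices (shuffled[0::2], shuffled[1::2]) extended onto the two argument lists, preserving the in-place mutation.
import Mathlib
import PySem

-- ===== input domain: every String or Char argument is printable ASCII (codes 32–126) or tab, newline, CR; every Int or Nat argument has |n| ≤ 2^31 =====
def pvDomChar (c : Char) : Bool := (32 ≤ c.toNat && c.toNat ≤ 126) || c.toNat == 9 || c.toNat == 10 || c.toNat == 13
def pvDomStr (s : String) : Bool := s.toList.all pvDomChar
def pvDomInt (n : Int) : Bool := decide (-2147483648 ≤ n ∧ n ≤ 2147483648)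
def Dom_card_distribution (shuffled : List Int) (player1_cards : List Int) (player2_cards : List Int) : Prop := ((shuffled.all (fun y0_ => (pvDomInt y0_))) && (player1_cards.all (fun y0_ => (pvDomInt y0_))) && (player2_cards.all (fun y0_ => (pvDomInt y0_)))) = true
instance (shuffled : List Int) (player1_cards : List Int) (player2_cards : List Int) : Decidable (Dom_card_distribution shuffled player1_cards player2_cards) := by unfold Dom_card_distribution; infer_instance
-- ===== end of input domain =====

-- B replaces A's counter/parity loop with two strided slices extended onto the argument lists (simpler decomposition).
-- A mutates player1_cards/player2_cards in place (appends), and B performs the same mutation via extend; the equivalence proved here is about the return value.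


-- ===== PORT A =====
-- the loop over shuffled with counter c and the two accumulating lists
def cardLoop : List Int → Int → List Int → List Int → List Int × List Int
  | [], _, p1, p2 => (p1, p2)
  | card :: rest, c, p1, p2 =>
    if PySem.Int.mod c 2 == 0 then cardLoop rest (c + 1) (p1 ++ [card]) p2
    else cardLoop rest (c + 1) p1 (p2 ++ [card])

def card_distribution (shuffled : List Int) (player1_cards : List Int) (player2_cards : List Int) : List Int × List Int :=
  let _t := shuffled.length  -- t = len(shuffled), unused in A
  cardLoop shuffled 0 player1_cards player2_cards

-- ===== PORT B =====
-- shuffled[0::2] / shuffled[1::2] ported with PySem.List.slice?; step 2 ≠ 0 so it never returns none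
def card_distribution_alt (shuffled : List Int) (player1_cards : List Int) (player2_cards : List Int) : List Int × List Int :=
  (player1_cards ++ (PySem.List.slice? shuffled (some 0) none 2).getD [],
   player2_cards ++ (PySem.List.slice? shuffled (some 1) none 2).getD [])

-- ===== PRECONDITION & SPEC =====
def Spec_card_distribution (shuffled : List Int) (player1_cards : List Int) (player2_cards : List Int) (out : List Int × List Int) : Prop := out = card_distribution_alt shuffled player1_cards player2_cards
instance (shuffled : List Int) (player1_cards : List Int) (player2_cards : List Int) (out : List Int × List Int) : Decidable (Spec_card_distribution shuffled player1_cards player2_cards out) := by unfold Spec_card_distribution; infer_instance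

-- ===== CLAIM (what is proved, stated in full; the proofs are below) =====
def Claim_equal_card_distribution : Prop := ∀ (shuffled : List Int) (player1_cards : List Int) (player2_cards : List Int), Dom_card_distribution shuffled player1_cards player2_cards → Spec_card_distribution shuffled player1_cards player2_cards (card_distribution shuffled player1_cards player2_cards)

-- ===== LEMMAS AND PROOFS =====

-- every second element starting at the head
def pvEvens : List Int → List Int
  | [] => []
  | [x] => [x]
  | x :: _ :: xs => x :: pvEvens xs

lemma pvEvens_cons (x : Int) (xs : List Int) : pvEvens (x :: xs) = x :: pvEvens xs.tail := by
  cases xs <;> simp [pvEvens]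

lemma core (ys : List Int) :
    List.filterMap (fun k : Nat => ys[(2 * (k : Int)).toNat]?) (List.range ((ys.length + 1) / 2)) = pvEvens ys := by
  induction ys using pvEvens.induct with
  | case1 => simp [pvEvens]
  | case2 x => simp [pvEvens]
  | case3 x y xs ih =>
    have hr : ((x :: y :: xs).length + 1) / 2 = (xs.length + 1) / 2 + 1 := by simp; omega
    rw [hr, List.range_succ_eq_map, List.filterMap_cons, List.filterMap_map]
    have h0 : ((x :: y :: xs)[(2 * ((0:Nat) : Int)).toNat]?) = some x := by norm_num
    rw [h0]
    have hfun : ((fun k : Nat => (x :: y :: xs)[(2 * (k : Int)).toNat]?) ∘ Nat.succ)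
        = fun k : Nat => xs[(2 * (k : Int)).toNat]? := by
      funext k
      have h2 : (2 * (((k : Nat) : Int) + 1)).toNat = (2 * (k : Int)).toNat + 2 := by omega
      simp only [Function.comp, Nat.succ_eq_add_one, Nat.cast_add, Nat.cast_one, h2]
      simp
    rw [hfun, ih]
    simp [pvEvens]

lemma slice_even (xs : List Int) : PySem.List.slice? xs (some 0) none 2 = some (pvEvens xs) := by
  have h := core xs
  simp only [PySem.List.slice?, PySem.List.sliceIndices]
  norm_num
  cases xs with
  | nil => simp [pvEvens]
  | cons a t =>
    have hc : (((((a :: t).length : Int)) + 2 - 1) / 2).toNat = ((a :: t).length + 1) / 2 := by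
      simp; omega
    simp only [List.length_cons, Nat.zero_lt_succ, if_pos] at *
    rw [hc]
    exact h

lemma slice_odd (xs : List Int) : PySem.List.slice? xs (some 1) none 2 = some (pvEvens xs.tail) := by
  cases xs with
  | nil => simp [PySem.List.slice?, PySem.List.sliceIndices, pvEvens]
  | cons a t =>
    have h := core t
    simp only [PySem.List.slice?, PySem.List.sliceIndices]
    norm_num
    have hc : (if 0 < t.length then ((((t.length):Int) + 2 - 1) / 2).toNat else 0) = (t.length + 1) / 2 := by
      split <;> omega
    have hf : (fun x : Nat => (a :: t)[(1 + 2 * (x:Int)).toNat]?) = fun x : Nat => t[(2 * (x:Int)).toNat]? := by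
      funext k
      have hk : (1 + 2 * (k:Int)).toNat = (2 * (k:Int)).toNat + 1 := by omega
      simp [hk]
    rw [hc, hf, h]

lemma pvMod_succ (c : Int) : (PySem.Int.mod (c + 1) 2 == 0) = !(PySem.Int.mod c 2 == 0) := by
  have h1 : PySem.Int.mod (c + 1) 2 = (c + 1) % 2 := by
    simp [PySem.Int.mod, Int.fmod_eq_emod]
  have h2 : PySem.Int.mod c 2 = c % 2 := by
    simp [PySem.Int.mod, Int.fmod_eq_emod]
  rw [h1, h2]
  rcases Int.emod_two_eq_zero_or_one c with h | h <;> simp [h] <;> omega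

lemma cardLoop_eq (xs : List Int) : ∀ (c : Int) (p1 p2 : List Int),
    cardLoop xs c p1 p2 =
      if PySem.Int.mod c 2 == 0 then (p1 ++ pvEvens xs, p2 ++ pvEvens xs.tail)
      else (p1 ++ pvEvens xs.tail, p2 ++ pvEvens xs) := by
  induction xs with
  | nil => intro c p1 p2; split <;> simp [cardLoop, pvEvens]
  | cons x rest ih =>
    intro c p1 p2
    cases h : (PySem.Int.mod c 2 == 0) with
    | true =>
      simp only [cardLoop, h, if_true, ih, pvMod_succ, Bool.not_true, if_false, Bool.false_eq_true]
      simp [pvEvens_cons]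
    | false =>
      simp only [cardLoop, h, if_false, ih, pvMod_succ, Bool.not_false, if_true, Bool.false_eq_true]
      simp [pvEvens_cons]

-- ===== VERDICT (by name: the statement is the Claim_ definition above) =====
theorem card_distribution_spec : Claim_equal_card_distribution := by
  intro shuffled p1 p2 _
  unfold Spec_card_distribution card_distribution card_distribution_alt
  rw [cardLoop_eq, slice_even, slice_odd]
  simp [PySem.Int.mod]
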